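-- pv_equiv track=rewrite | github.com/mohamadpishdar/SmartGraphical | SmartGraphical.py | extract_func_func_mapping
-- ===== SOURCE A (Python) =====
-- def extract_func_func_mapping(func_names, bodies):
--     ret = {}
--     for i in func_names:
--         ret[i] = []
--     for i in range(len(func_names)):
--         for j in range(len(bodies)):
--             if func_names[i]+'(' in bodies[j] and not '_'+func_names[i] in bodies[j]:
--                 if i == j:
--                     ret[func_names[i]].append('super.'+func_names[j])
--                 else:
--                     if ret[func_names[i]].count(func_names[j]) == 0:
--                         ret[func_names[i]].append(func_names[j])
--     return ret
-- ===== SOURCE B (Python) =====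
-- def extract_func_func_mapping(func_names, bodies):
--     # Index the names first (occurrence lists per distinct name), then compute each
--     # distinct name's matching-body list ONCE and replay its occurrence rows over it,
--     # instead of A's full index-grid scan that re-tests the substring condition for
--     # every (occurrence, body) pair.
--     ret = {}
--     occ = {}
--     for i, name in enumerate(func_names):
--         ret.setdefault(name, [])
--         occ.setdefault(name, []).append(i)
--     for name, lst in ret.items():
--         js = [j for j, body in enumerate(bodies)
--               if name + '(' in body and '_' + name not in body]
--         for i in occ[name]:
--             for j in js:
--                 if i == j:
--                     lst.append('super.' + func_names[j])
--                 elif func_names[j] not in lst: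
--                     lst.append(func_names[j])
--     return ret
-- ===== Notes on version B (the rewrite author's own statement) =====
-- stated objective: alternative
-- what changed: B builds an occurrence index of the names in one enumerate pass and, per distinct name, computes the list of matching bodies once and replays the name's occurrence rows over it, instead of A's full index-grid double loop that re-tests the substring condition for every (occurrence, body) pair; dedup is a membership test instead of list.count.
import Mathlib
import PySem

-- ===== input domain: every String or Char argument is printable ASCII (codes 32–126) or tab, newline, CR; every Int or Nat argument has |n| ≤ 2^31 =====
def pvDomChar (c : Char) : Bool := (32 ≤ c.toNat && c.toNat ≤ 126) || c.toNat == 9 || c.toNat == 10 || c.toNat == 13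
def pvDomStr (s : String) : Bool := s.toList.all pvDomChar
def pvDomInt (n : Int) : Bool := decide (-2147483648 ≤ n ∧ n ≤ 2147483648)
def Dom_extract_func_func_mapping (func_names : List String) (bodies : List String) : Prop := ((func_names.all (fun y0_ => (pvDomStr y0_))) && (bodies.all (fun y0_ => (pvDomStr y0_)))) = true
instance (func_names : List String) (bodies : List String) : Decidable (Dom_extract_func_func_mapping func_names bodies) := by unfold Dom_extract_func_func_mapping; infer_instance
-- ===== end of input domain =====

-- B indexes the names once (occurrence lists per distinct name) and computes each
-- distinct name's matching-body list once, replaying its occurrence rows over it,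
-- instead of A's full index-grid scan; same return value (objective: alternative).


-- ===== PORT A =====
def extract_func_func_mapping (func_names : List String) (bodies : List String) : List (String × List String) :=
  let ret0 : PySem.Dict String (List String) :=
    func_names.foldl (fun d i => d.insert i ([] : List String)) PySem.Dict.empty
  let ret :=
    (PySem.List.pyRange 0 (func_names.length : Int) 1).foldl (fun d i =>
      (PySem.List.pyRange 0 (bodies.length : Int) 1).foldl (fun d j =>
        if PySem.Str.isIn (PySem.List.pyGetD func_names i "" ++ "(") (PySem.List.pyGetD bodies j "")
            && !(PySem.Str.isIn ("_" ++ PySem.List.pyGetD func_names i "") (PySem.List.pyGetD bodies j "")) then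
          if i == j then
            d.modify (PySem.List.pyGetD func_names i "") []
              (fun l => l ++ ["super." ++ PySem.List.pyGetD func_names j ""])
          else
            if PySem.List.count (d.getD (PySem.List.pyGetD func_names i "") [])
                (PySem.List.pyGetD func_names j "") == 0 then
              d.modify (PySem.List.pyGetD func_names i "") []
                (fun l => l ++ [PySem.List.pyGetD func_names j ""])
            else d
        else d) d) ret0
  ret.items

-- ===== PORT B =====
def extract_func_func_mapping_alt (func_names : List String) (bodies : List String) : List (String × List String) :=
  -- one loop builds ret = {name: []} and occ = {name: [occurrence indices]}
  let st :=
    (PySem.List.enumerate func_names).foldl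
      (fun (s : PySem.Dict String (List String) × PySem.Dict String (List Int)) q =>
        (s.1.setdefault q.2 [], s.2.modify q.2 [] (fun l => l ++ [q.1])))
      (PySem.Dict.empty, PySem.Dict.empty)
  let occ := st.2
  -- for name, lst in ret.items(): compute js once, then replay the occurrence rows
  let ret := st.1.items.foldl (fun d p =>
      let js := ((PySem.List.enumerate bodies).filter (fun r =>
          PySem.Str.isIn (p.1 ++ "(") r.2 && !(PySem.Str.isIn ("_" ++ p.1) r.2))).map (fun r => r.1)
      d.insert p.1 ((occ.getD p.1 []).foldl (fun lst i =>
          js.foldl (fun lst j =>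
            if i == j then lst ++ ["super." ++ PySem.List.pyGetD func_names j ""]
            else if !(lst.contains (PySem.List.pyGetD func_names j "")) then
              lst ++ [PySem.List.pyGetD func_names j ""]
            else lst) lst) p.2)) st.1
  ret.items

-- ===== PRECONDITION & SPEC =====
-- helper for Pre_ only: "body contains a call of name" exactly as both Pythons test it
def pvCalls (name body : String) : Bool :=
  PySem.Str.isIn (name ++ "(") body && !(PySem.Str.isIn ("_" ++ name) body)

-- Pre_ excludes exactly the inputs on which some body at an index ≥ len(func_names)
-- contains a call of some name: there Python A raises IndexError on func_names[j]
-- (and Python B raises the same way); on every other input A returns normally.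
def Pre_extract_func_func_mapping (func_names : List String) (bodies : List String) : Prop :=
  ∀ j < bodies.length, func_names.length ≤ j →
    ∀ n ∈ func_names, pvCalls n (bodies.getD j "") = false

instance (func_names : List String) (bodies : List String) : Decidable (Pre_extract_func_func_mapping func_names bodies) := by
  unfold Pre_extract_func_func_mapping; infer_instance

def pvWitness_extract_func_func_mapping : List String × List String :=
  (["f", "g"], ["g()", "f()"])

def Spec_extract_func_func_mapping (func_names : List String) (bodies : List String) (out : List (String × List String)) : Prop := out = extract_func_func_mapping_alt func_names bodies
instance (func_names : List String) (bodies : List String) (out : List (String × List String)) : Decidable (Spec_extract_func_func_mapping func_names bodies out) := by unfold Spec_extract_func_func_mapping; infer_instance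

-- ===== CLAIM (what is proved, stated in full; the proofs are below) =====
def Claim_equal_extract_func_func_mapping : Prop := ∀ (func_names : List String) (bodies : List String), Dom_extract_func_func_mapping func_names bodies → Pre_extract_func_func_mapping func_names bodies → Spec_extract_func_func_mapping func_names bodies (extract_func_func_mapping func_names bodies)

-- ===== LEMMAS AND PROOFS =====

-- a fold commutes with a projection on which every step acts pointwise
theorem pv_foldl_proj {σ β α : Type} (l : List α) (F : σ → α → σ) (g : β → α → β) (π : σ → β)
    (h : ∀ s a, a ∈ l → π (F s a) = g (π s) a) (s : σ) :
    π (l.foldl F s) = l.foldl g (π s) := by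
  induction l generalizing s with
  | nil => rfl
  | cons a l ih =>
    simp only [List.foldl_cons]
    rw [ih (fun s b hb => h s b (List.mem_cons_of_mem _ hb)), h s a List.mem_cons_self]

-- specialisation to the dicts of the two ports (stated applied, so it matches goals)
theorem pv_getD_foldl {α : Type} (l : List α)
    (F : PySem.Dict String (List String) → α → PySem.Dict String (List String))
    (g : List String → α → List String) (k : String)
    (h : ∀ d a, a ∈ l → (F d a).getD k [] = g (d.getD k []) a) (d : PySem.Dict String (List String)) :
    ((l.foldl F d).getD k []) = l.foldl g (d.getD k []) :=
  pv_foldl_proj l F g (fun d => d.getD k []) h d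

-- a guarded fold is the fold over the filtered list
theorem pv_foldl_guard_filter {α β : Type} (l : List α) (p : α → Bool) (G : β → α → β) (b : β) :
    l.foldl (fun b a => if p a then G b a else b) b = (l.filter p).foldl G b := by
  induction l generalizing b with
  | nil => rfl
  | cons a l ih =>
    by_cases hp : p a = true
    · rw [List.filter_cons_of_pos hp]
      simp only [List.foldl_cons, if_pos hp]
      exact ih (G b a)
    · rw [List.filter_cons_of_neg (by simpa using hp)]
      simp only [List.foldl_cons, if_neg hp]
      exact ih b

theorem pv_foldl_const {α β : Type} (l : List α) (b : β) :
    l.foldl (fun b _ => b) b = b := by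
  induction l generalizing b with
  | nil => rfl
  | cons a l ih => simp only [List.foldl_cons]; exact ih b

theorem pv_count_beq_zero (l : List String) (v : String) :
    (List.count v l == 0) = !(l.contains v) := by
  by_cases hv : v ∈ l
  · simp [hv, Nat.ne_of_gt (List.count_pos_iff.mpr hv)]
  · simp [hv, List.count_eq_zero.mpr hv]

-- a nodup set filtered at one of its members is that singleton
theorem pv_filter_self {α : Type} [BEq α] [LawfulBEq α] (S : List α) (hnd : S.Nodup) (k : α)
    (hk : k ∈ S) : S.filter (fun x => x == k) = [k] := by
  rw [List.filter_beq k,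
    Nat.le_antisymm (List.nodup_iff_count_le_one.mp hnd k) (List.count_pos_iff.mpr hk)]
  rfl

-- projecting an enumerate-filter to the indices = filtering the index range
theorem pv_enum_filter_fst (xs : List String) (p : String → Bool) :
    (((PySem.List.enumerate xs).filter (fun q => p q.2)).map (fun q => q.1))
    = (PySem.List.pyRange 0 (xs.length : Int) 1).filter
        (fun i => p (PySem.List.pyGetD xs i "")) := by
  rw [PySem.List.enumerate_eq_map_pyRange xs "", List.filter_map, List.map_map]
  rw [PySem.List.len_eq]
  have h1 : ((fun q : Int × String => q.1) ∘ (fun j => (j, PySem.List.pyGetD xs j ""))) = id := rfl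
  have h2 : ((fun q : Int × String => p q.2) ∘ (fun j => (j, PySem.List.pyGetD xs j "")))
      = (fun i => p (PySem.List.pyGetD xs i "")) := rfl
  rw [h1, h2, List.map_id]

-- named pieces of the two ports (rfl-equal to the inline code; proofs only)
def pvCond (bodies : List String) (k : String) : Int → Bool := fun j =>
  PySem.Str.isIn (k ++ "(") (PySem.List.pyGetD bodies j "")
    && !(PySem.Str.isIn ("_" ++ k) (PySem.List.pyGetD bodies j ""))

def pvCoreA (fn : List String) (i : Int) : List String → Int → List String := fun lst j =>
  if i == j then lst ++ ["super." ++ PySem.List.pyGetD fn j ""]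
  else if PySem.List.count lst (PySem.List.pyGetD fn j "") == 0 then
    lst ++ [PySem.List.pyGetD fn j ""]
  else lst

def pvRawA (fn bodies : List String) (i : Int) : List String → Int → List String := fun lst j =>
  if pvCond bodies (PySem.List.pyGetD fn i "") j then pvCoreA fn i lst j else lst

def pvCoreB (fn : List String) (i : Int) : List String → Int → List String := fun lst j =>
  if i == j then lst ++ ["super." ++ PySem.List.pyGetD fn j ""]
  else if !(lst.contains (PySem.List.pyGetD fn j "")) then lst ++ [PySem.List.pyGetD fn j ""]
  else lst

def pvRet0 (fn : List String) : PySem.Dict String (List String) :=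
  fn.foldl (fun d i => d.insert i ([] : List String)) PySem.Dict.empty

def pvDictA (fn bodies : List String) : PySem.Dict String (List String) :=
  (PySem.List.pyRange 0 (fn.length : Int) 1).foldl (fun d i =>
    (PySem.List.pyRange 0 (bodies.length : Int) 1).foldl (fun d j =>
      if PySem.Str.isIn (PySem.List.pyGetD fn i "" ++ "(") (PySem.List.pyGetD bodies j "")
          && !(PySem.Str.isIn ("_" ++ PySem.List.pyGetD fn i "") (PySem.List.pyGetD bodies j "")) then
        if i == j then
          d.modify (PySem.List.pyGetD fn i "") []
            (fun l => l ++ ["super." ++ PySem.List.pyGetD fn j ""])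
        else
          if PySem.List.count (d.getD (PySem.List.pyGetD fn i "") [])
              (PySem.List.pyGetD fn j "") == 0 then
            d.modify (PySem.List.pyGetD fn i "") []
              (fun l => l ++ [PySem.List.pyGetD fn j ""])
          else d
      else d) d) (pvRet0 fn)

def pvRet0B (fn : List String) : PySem.Dict String (List String) :=
  (PySem.List.enumerate fn).foldl (fun d q => d.setdefault q.2 ([] : List String)) PySem.Dict.empty

def pvOcc (fn : List String) : PySem.Dict String (List Int) :=
  (PySem.List.enumerate fn).foldl (fun d q => d.modify q.2 [] (fun l => l ++ [q.1])) PySem.Dict.empty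

def pvVal (fn bodies : List String) (p : String × List String) : List String :=
  ((pvOcc fn).getD p.1 []).foldl (fun lst i =>
    (((PySem.List.enumerate bodies).filter (fun r =>
        PySem.Str.isIn (p.1 ++ "(") r.2 && !(PySem.Str.isIn ("_" ++ p.1) r.2))).map
      (fun r => r.1)).foldl (pvCoreB fn i) lst) p.2

def pvDictB (fn bodies : List String) : PySem.Dict String (List String) :=
  (pvRet0B fn).items.foldl (fun d p => d.insert p.1 (pvVal fn bodies p)) (pvRet0B fn)

theorem pvB_eq_dictB (fn bodies : List String) :
    extract_func_func_mapping_alt fn bodies = (pvDictB fn bodies).items := by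
  unfold extract_func_func_mapping_alt pvDictB pvVal pvOcc pvRet0B pvCoreB
  have hp := PySem.List.foldl_prod_mk
    (fun (d : PySem.Dict String (List String)) (q : Int × String) => d.setdefault q.2 [])
    (fun (d : PySem.Dict String (List Int)) (q : Int × String) => d.modify q.2 [] (fun l => l ++ [q.1]))
    (PySem.List.enumerate fn) PySem.Dict.empty PySem.Dict.empty
  dsimp only at hp ⊢
  rw [hp]

-- ---- the initial dicts ----

theorem pv_ret0_getD (fn : List String) (k : String) : (pvRet0 fn).getD k [] = [] := by
  unfold pvRet0
  refine List.foldlRecOn (motive := fun d : PySem.Dict String (List String) => d.getD k [] = [])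
    fn _ (by simp) ?_
  intro d hd a _
  rw [PySem.Dict.getD_insert]
  split_ifs <;> simp [hd]

theorem pv_ret0_keys (fn : List String) : (pvRet0 fn).keys = PySem.Set.ofList fn := by
  have h := PySem.Dict.keys_foldl_insert fn (fun _ _ => ([] : List String)) PySem.Dict.empty
  unfold pvRet0
  rw [h, PySem.Dict.keys_empty, PySem.Set.update_nil_left]

theorem pv_ret0B_getD (fn : List String) (k : String) : (pvRet0B fn).getD k [] = [] := by
  unfold pvRet0B
  refine List.foldlRecOn (motive := fun d : PySem.Dict String (List String) => d.getD k [] = [])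
    _ _ (by simp) ?_
  intro d hd q _
  by_cases hq : k = q.2
  · rw [hq, PySem.Dict.getD_setdefault_self]
    rw [← hq, hd]
  · rw [PySem.Dict.getD_eq_get?_getD, PySem.Dict.get?_setdefault_of_ne d [] hq,
      ← PySem.Dict.getD_eq_get?_getD, hd]

theorem pv_setdefault_keys (l : List (Int × String)) (d : PySem.Dict String (List String)) :
    (l.foldl (fun d q => d.setdefault q.2 ([] : List String)) d).keys
      = PySem.Set.update d.keys (l.map (fun q => q.2)) := by
  induction l generalizing d with
  | nil => simp [PySem.Set.update_nil]
  | cons q l ih =>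
    simp only [List.foldl_cons, List.map_cons, PySem.Set.update_cons]
    rw [ih]
    congr 1
    rw [PySem.Dict.keys_setdefault]
    by_cases hc : d.contains q.2 = true
    · rw [if_pos hc]
      have hm := (PySem.Dict.contains_iff_mem_keys d q.2).mp hc
      simp [PySem.Set.add, hm]
    · rw [if_neg hc]
      have hnm : q.2 ∉ d.keys := fun hm => hc ((PySem.Dict.contains_iff_mem_keys d q.2).mpr hm)
      simp [PySem.Set.add, hnm]

theorem pv_ret0B_keys (fn : List String) : (pvRet0B fn).keys = PySem.Set.ofList fn := by
  unfold pvRet0B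
  rw [pv_setdefault_keys _ PySem.Dict.empty, PySem.Dict.keys_empty,
    PySem.List.map_snd_enumerate, PySem.Set.update_nil_left]

theorem pv_ret0B_items (fn : List String) :
    (pvRet0B fn).items = (PySem.Set.ofList fn).map (fun k => (k, ([] : List String))) := by
  rw [PySem.Dict.items_eq_map_keys _ (by rw [pv_ret0B_keys]; exact PySem.Set.nodup_ofList fn)
    ([] : List String), pv_ret0B_keys]
  exact List.map_congr_left (fun k _ => by rw [pv_ret0B_getD])

-- ---- the occurrence dict: occ[name] = ascending indices of name ----

theorem pv_occ_getD (fn : List String) (k : String) :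
    (pvOcc fn).getD k [] = (PySem.List.pyRange 0 (fn.length : Int) 1).filter
      (fun i => PySem.List.pyGetD fn i "" == k) := by
  unfold pvOcc
  have hswap : (PySem.List.enumerate fn).foldl (fun d q => d.modify q.2 [] (fun l => l ++ [q.1]))
        PySem.Dict.empty
      = ((PySem.List.enumerate fn).map Prod.swap).foldl
        (fun d p => d.modify p.1 [] (fun l => l ++ [p.2])) PySem.Dict.empty := by
    rw [List.foldl_map]; rfl
  rw [hswap, PySem.Dict.getD_foldl_modify_append]
  rw [List.filter_map]
  have h1 : ((fun p : String × Int => p.1 == k) ∘ Prod.swap) = (fun q : Int × String => q.2 == k) := rfl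
  rw [h1, List.map_map]
  have h2 : ((fun p : String × Int => p.2) ∘ Prod.swap) = (fun q : Int × String => q.1) := rfl
  rw [h2]
  have h3 := pv_enum_filter_fst fn (fun x => x == k)
  simpa using h3

-- ---- keys of the two result dicts ----

theorem pv_pyGetD_mem (fn : List String) (i : Int) (h0 : 0 ≤ i) (h1 : i < fn.length) :
    PySem.List.pyGetD fn i "" ∈ fn := by
  have ht : i = ((i.toNat : Nat) : Int) := by omega
  have hlt : i.toNat < fn.length := by omega
  rw [ht, PySem.List.pyGetD_natCast, List.getD_eq_getElem fn "" hlt]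
  exact List.getElem_mem hlt

theorem pvA_keys (fn bodies : List String) : (pvDictA fn bodies).keys = PySem.Set.ofList fn := by
  unfold pvDictA
  refine List.foldlRecOn
    (motive := fun d : PySem.Dict String (List String) => d.keys = PySem.Set.ofList fn)
    _ _ (pv_ret0_keys fn) ?_
  intro d hd i hi
  obtain ⟨h0, h1⟩ := PySem.List.mem_pyRange_one.mp hi
  have hmem : PySem.List.pyGetD fn i "" ∈ PySem.Set.ofList fn :=
    (PySem.Set.mem_ofList fn _).mpr (pv_pyGetD_mem fn i h0 (by simpa using h1))
  refine List.foldlRecOn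
    (motive := fun d : PySem.Dict String (List String) => d.keys = PySem.Set.ofList fn)
    _ _ hd ?_
  intro d hd j _
  have hcont : d.contains (PySem.List.pyGetD fn i "") = true :=
    (PySem.Dict.contains_iff_mem_keys d _).mpr (by rw [hd]; exact hmem)
  split_ifs <;>
    simp [PySem.Dict.keys_modify, PySem.Dict.keys_insert_of_contains _ _ hcont, hd]

theorem pvB_keys (fn bodies : List String) : (pvDictB fn bodies).keys = PySem.Set.ofList fn := by
  unfold pvDictB
  refine List.foldlRecOn
    (motive := fun d : PySem.Dict String (List String) => d.keys = PySem.Set.ofList fn)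
    _ _ (pv_ret0B_keys fn) ?_
  intro d hd p hp
  have hmem : p.1 ∈ PySem.Set.ofList fn := by
    rw [pv_ret0B_items] at hp
    obtain ⟨k, hk, rfl⟩ := List.mem_map.mp hp
    exact hk
  have hcont : d.contains p.1 = true :=
    (PySem.Dict.contains_iff_mem_keys d _).mpr (by rw [hd]; exact hmem)
  simp [PySem.Dict.keys_insert_of_contains _ _ hcont, hd]

-- ---- per-key characterisation of A ----

theorem pvA_outer_step (fn bodies : List String) (k : String) (i : Int) (d : PySem.Dict String (List String)) :
    ((PySem.List.pyRange 0 (bodies.length : Int) 1).foldl (fun d j =>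
        if PySem.Str.isIn (PySem.List.pyGetD fn i "" ++ "(") (PySem.List.pyGetD bodies j "")
            && !(PySem.Str.isIn ("_" ++ PySem.List.pyGetD fn i "") (PySem.List.pyGetD bodies j "")) then
          if i == j then
            d.modify (PySem.List.pyGetD fn i "") []
              (fun l => l ++ ["super." ++ PySem.List.pyGetD fn j ""])
          else
            if PySem.List.count (d.getD (PySem.List.pyGetD fn i "") [])
                (PySem.List.pyGetD fn j "") == 0 then
              d.modify (PySem.List.pyGetD fn i "") []
                (fun l => l ++ [PySem.List.pyGetD fn j ""])
            else d
        else d) d).getD k []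
    = if PySem.List.pyGetD fn i "" == k then
        (PySem.List.pyRange 0 (bodies.length : Int) 1).foldl (pvRawA fn bodies i) (d.getD k [])
      else d.getD k [] := by
  by_cases hni : (PySem.List.pyGetD fn i "" == k) = true
  · rw [if_pos hni]
    have hk : PySem.List.pyGetD fn i "" = k := eq_of_beq hni
    refine pv_getD_foldl _ _ _ _ ?_ d
    intro d j _
    dsimp only
    rw [hk]
    simp only [pvRawA, pvCond, pvCoreA, hk]
    split_ifs <;> simp [PySem.Dict.getD_modify_self, *]
  · rw [if_neg hni]
    have hk : k ≠ PySem.List.pyGetD fn i "" := fun h => hni (by rw [h]; simp)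
    have h2 := pv_getD_foldl (PySem.List.pyRange 0 (bodies.length : Int) 1)
      (fun d j =>
        if PySem.Str.isIn (PySem.List.pyGetD fn i "" ++ "(") (PySem.List.pyGetD bodies j "")
            && !(PySem.Str.isIn ("_" ++ PySem.List.pyGetD fn i "") (PySem.List.pyGetD bodies j "")) then
          if i == j then
            d.modify (PySem.List.pyGetD fn i "") []
              (fun l => l ++ ["super." ++ PySem.List.pyGetD fn j ""])
          else
            if PySem.List.count (d.getD (PySem.List.pyGetD fn i "") [])
                (PySem.List.pyGetD fn j "") == 0 then
              d.modify (PySem.List.pyGetD fn i "") []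
                (fun l => l ++ [PySem.List.pyGetD fn j ""])
            else d
        else d)
      (fun lst (_ : Int) => lst) k
      (fun d j _ => by
        dsimp only
        split_ifs <;> simp [PySem.Dict.getD_modify_of_ne _ _ _ hk]) d
    rw [h2, pv_foldl_const]

theorem pvA_getD (fn bodies : List String) (k : String) :
    (pvDictA fn bodies).getD k []
    = ((PySem.List.pyRange 0 (fn.length : Int) 1).filter
        (fun i => PySem.List.pyGetD fn i "" == k)).foldl
      (fun lst i => (PySem.List.pyRange 0 (bodies.length : Int) 1).foldl (pvRawA fn bodies i) lst)
      [] := by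
  unfold pvDictA
  rw [pv_getD_foldl _ _
    (fun lst i => if PySem.List.pyGetD fn i "" == k then
      (PySem.List.pyRange 0 (bodies.length : Int) 1).foldl (pvRawA fn bodies i) lst else lst)
    k (fun d i _ => pvA_outer_step fn bodies k i d) (pvRet0 fn)]
  rw [pv_ret0_getD]
  exact pv_foldl_guard_filter _ (fun i => PySem.List.pyGetD fn i "" == k)
    (fun lst i => (PySem.List.pyRange 0 (bodies.length : Int) 1).foldl (pvRawA fn bodies i) lst) []

-- ---- per-key characterisation of B ----

theorem pvB_getD (fn bodies : List String) (k : String) (hk : k ∈ fn) :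
    (pvDictB fn bodies).getD k [] = pvVal fn bodies (k, []) := by
  unfold pvDictB
  rw [pv_getD_foldl _ _
    (fun lst p => if p.1 == k then pvVal fn bodies p else lst) k
    (fun d p _ => by
      dsimp only
      by_cases hp : (p.1 == k) = true
      · rw [if_pos hp, PySem.Dict.getD_insert, if_pos (eq_of_beq hp).symm]
      · rw [if_neg hp, PySem.Dict.getD_insert,
          if_neg (fun h => hp (by rw [h]; simp))]) (pvRet0B fn)]
  rw [pv_ret0B_getD, pv_foldl_guard_filter, pv_ret0B_items, List.filter_map]
  have h1 : ((fun p : String × List String => p.1 == k) ∘ (fun k => (k, ([] : List String))))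
      = (fun x => x == k) := rfl
  rw [h1, pv_filter_self (PySem.Set.ofList fn) (PySem.Set.nodup_ofList fn) k
    ((PySem.Set.mem_ofList fn k).mpr hk)]
  rfl

-- ---- the per-key values agree ----

theorem pv_key_eq (fn bodies : List String) (k : String) (hk : k ∈ fn) :
    (pvDictA fn bodies).getD k [] = (pvDictB fn bodies).getD k [] := by
  rw [pvA_getD fn bodies k, pvB_getD fn bodies k hk]
  unfold pvVal
  rw [pv_occ_getD fn k]
  have hjs : (((PySem.List.enumerate bodies).filter (fun r =>
        PySem.Str.isIn (k ++ "(") r.2 && !(PySem.Str.isIn ("_" ++ k) r.2))).map (fun r => r.1))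
      = (PySem.List.pyRange 0 (bodies.length : Int) 1).filter (pvCond bodies k) :=
    pv_enum_filter_fst bodies
      (fun b => PySem.Str.isIn (k ++ "(") b && !(PySem.Str.isIn ("_" ++ k) b))
  rw [hjs]
  refine PySem.List.foldl_congr_mem _ _ _ [] ?_
  intro lst i hi
  have hik : PySem.List.pyGetD fn i "" = k := by
    have := (List.mem_filter.mp hi).2
    exact eq_of_beq this
  have hraw : pvRawA fn bodies i
      = (fun lst j => if pvCond bodies k j then pvCoreA fn i lst j else lst) := by
    unfold pvRawA
    rw [hik]
  rw [hraw, pv_foldl_guard_filter _ (pvCond bodies k) (pvCoreA fn i) lst]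
  refine PySem.List.foldl_congr_mem _ _ _ lst ?_
  intro lst j _
  simp only [pvCoreA, pvCoreB, PySem.List.count_eq, pv_count_beq_zero]

-- ---- assembly ----

theorem pv_main (func_names bodies : List String) :
    extract_func_func_mapping func_names bodies = extract_func_func_mapping_alt func_names bodies := by
  have e1 : extract_func_func_mapping func_names bodies = (pvDictA func_names bodies).items := rfl
  rw [e1, pvB_eq_dictB,
    PySem.Dict.items_eq_map_keys _ (by rw [pvA_keys]; exact PySem.Set.nodup_ofList func_names)
      ([] : List String),
    PySem.Dict.items_eq_map_keys _ (by rw [pvB_keys]; exact PySem.Set.nodup_ofList func_names)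
      ([] : List String),
    pvA_keys func_names bodies, pvB_keys func_names bodies]
  exact List.map_congr_left (fun k hk => by
    rw [pv_key_eq func_names bodies k ((PySem.Set.mem_ofList func_names k).mp hk)])

-- ===== VERDICT (by name: the statement is the Claim_ definition above) =====
theorem extract_func_func_mapping_spec : Claim_equal_extract_func_func_mapping := by
  intro func_names bodies _ _
  unfold Spec_extract_func_func_mapping
  exact pv_main func_names bodies
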